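-- pv_equiv track=rewrite | github.com/lucrativedust/COL100-2020-21-Python | Python Code/Assignment 5.py | stringProblem
-- ===== SOURCE A (Python) =====
-- vowels = ["a","e","i","o","u"]
--
-- def vowelcheck(x):
--     for y in vowels:
--         if x == y:
--             return True
--     return False
--
-- def stringProblem(A,B):
--     c = []
--     #Assertion 1
--     #c[k] represents the required value if we consider the first k characters of the string B and the all the characters before the current character in consideration for the string A.
--     #For Loop 1
--     for i in range(len(B)+1):
--         #Initially we have not considered any characters of the string A. So c[k] = k, as we just have to insert all the k characters in the correct order and that will take k steps.
--         c.append(i)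
--     #Now we know the required output if we do not consider any character of the first string.
--     #Assertion 2
--     #d represents the list of minimum number of changes required if we take all the characters of the string A including the current character ii.
--     #Outer For Loop
--     for i,ii in enumerate(A):
--         #Assertion 1 holds
--         #d represents the list of minimum number of changes required if we take the first characters of the string A till the character ii and d[k] represents minimum number of changes required to convert this part of the string A to the first k characters of string B.
--         #Initially, we do not consider any element of the second string. So, to convert A to B (empty string), we will have to delete all the characters and that would take i+1 steps. So, initially d[0]= i+1.
--         d = [i+1]
--         #Inner For Loop
--         for j,jj in enumerate(B):
--             #all elements of d, that is d[k] represents the minimum number of changes required if we take the first k characters of the second string B and all characters of A till the current character.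
--             if ii == jj:
--                 d.append(c[j])
--             else:
--                 if vowelcheck(ii):
--                     if vowelcheck(jj):
--                         d.append(1 + min(d[j],c[j+1],c[j]))
--                     else:
--                         d.append(1 + min(d[j],c[j+1]))
--                 else:
--                     d.append(1 + min(d[j],c[j+1],c[j]))
--         #Assertion 2 holds.
--         #Now, we are going to consider the next character of the string A as well, so we set c=d for the next character as i increases by 1.
--         c = d
--     #As we consider all elements of the string A, c[-1] represents the minimum number of changes required if we want to convert string A to the string made up by considering all the characters of the string B. So, we return c[-1] as the output.
--     return c[-1]
-- ===== SOURCE B (Python) =====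
-- vowels = ["a", "e", "i", "o", "u"]
--
--
-- def stringProblem(A, B):
--     # Top-down memoized recursion: dist(i, j) = min edits turning A[:i] into B[:j],
--     # with substitution forbidden when A[i-1] is a vowel and B[j-1] is not.
--     memo = {}
--
--     def dist(i, j):
--         key = (i, j)
--         if key in memo:
--             return memo[key]
--         if i == 0:
--             r = j
--         elif j == 0:
--             r = i
--         elif A[i - 1] == B[j - 1]:
--             r = dist(i - 1, j - 1)
--         else:
--             r = 1 + min(dist(i, j - 1), dist(i - 1, j))
--             if not (A[i - 1] in vowels and B[j - 1] not in vowels):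
--                 r = min(r, 1 + dist(i - 1, j - 1))
--         memo[key] = r
--         return r
--
--     return dist(len(A), len(B))
-- ===== Notes on version B (the rewrite author's own statement) =====
-- stated objective: alternative
-- what changed: Replaces the bottom-up row-by-row DP table iteration with top-down memoized recursion dist(i,j) on prefix lengths, caching results in a dict.
import Mathlib
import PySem

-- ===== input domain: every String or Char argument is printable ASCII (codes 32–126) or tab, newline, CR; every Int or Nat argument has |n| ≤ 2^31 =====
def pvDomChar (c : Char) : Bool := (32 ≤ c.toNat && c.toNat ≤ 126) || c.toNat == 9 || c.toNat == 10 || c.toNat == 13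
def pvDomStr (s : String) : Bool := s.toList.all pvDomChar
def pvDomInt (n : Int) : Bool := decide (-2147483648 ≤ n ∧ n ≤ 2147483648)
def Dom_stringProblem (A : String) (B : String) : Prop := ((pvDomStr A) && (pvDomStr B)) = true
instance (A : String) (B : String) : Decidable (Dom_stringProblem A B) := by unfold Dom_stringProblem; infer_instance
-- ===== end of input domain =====

-- B replaces A's bottom-up row-by-row table iteration with top-down memoized recursion on prefix lengths (alternative decomposition, same cost); return values only, no observable mutation.

-- ===== PORT A =====
def vowels : List Char := ['a', 'e', 'i', 'o', 'u']

def vowelcheck (x : Char) : Bool := vowels.any (fun y => x == y)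

-- inner 'for j,jj in enumerate(B)' loop of A; list indices d[j], c[j], c[j+1] are
-- always in range here, so pyGetD's default is never used (exact).
def rowStep (c : List Int) (ii : Char) (d : List Int) (q : Int × Char) : List Int :=
  let j := q.1
  let jj := q.2
  if ii == jj then d ++ [PySem.List.pyGetD c j 0]
  else if vowelcheck ii then
    if vowelcheck jj then
      d ++ [1 + min (PySem.List.pyGetD d j 0) (min (PySem.List.pyGetD c (j + 1) 0) (PySem.List.pyGetD c j 0))]
    else
      d ++ [1 + min (PySem.List.pyGetD d j 0) (PySem.List.pyGetD c (j + 1) 0)]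
  else
    d ++ [1 + min (PySem.List.pyGetD d j 0) (min (PySem.List.pyGetD c (j + 1) 0) (PySem.List.pyGetD c j 0))]

def rowA (c : List Int) (i : Int) (ii : Char) (bs : List Char) : List Int :=
  (PySem.List.enumerate bs 0).foldl (rowStep c ii) [i + 1]

def stringProblem (A : String) (B : String) : Int :=
  let c0 := (PySem.List.pyRange 0 ((B.toList.length : Int) + 1) 1).foldl (fun c i => c ++ [i]) ([] : List Int)
  let c := (PySem.List.enumerate A.toList 0).foldl (fun c p => rowA c p.1 p.2 B.toList) c0
  -- c is never empty (length len(B)+1), so c[-1] never raises; default never used.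
  PySem.List.pyGetD c (-1) 0

-- ===== PORT B =====
-- memoized recursion dist(i, j) of Source B; the memo dict is threaded through explicitly.
-- A[i-1]/B[j-1] are always indexed in range (1 ≤ i ≤ len(A)), so getD's default is never used.
def distB (as bs : List Char) : Nat → Nat → PySem.Dict (Nat × Nat) Int → Int × PySem.Dict (Nat × Nat) Int
  | i, j, m =>
    match m.get? (i, j) with
    | some v => (v, m)
    | none =>
      let rm : Int × PySem.Dict (Nat × Nat) Int :=
        match i, j with
        | 0, j' => ((j' : Int), m)
        | i' + 1, 0 => ((i' : Int) + 1, m)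
        | i' + 1, j' + 1 =>
          if as.getD i' ' ' == bs.getD j' ' ' then
            distB as bs i' j' m
          else
            let p1 := distB as bs (i' + 1) j' m
            let p2 := distB as bs i' (j' + 1) p1.2
            let r := 1 + min p1.1 p2.1
            if !(vowelcheck (as.getD i' ' ') && !vowelcheck (bs.getD j' ' ')) then
              let p3 := distB as bs i' j' p2.2
              (min r (1 + p3.1), p3.2)
            else (r, p2.2)
      (rm.1, rm.2.insert (i, j) rm.1)
  termination_by i j m => (i, j)

def stringProblem_alt (A : String) (B : String) : Int :=
  (distB A.toList B.toList A.toList.length B.toList.length PySem.Dict.empty).1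

-- ===== PRECONDITION & SPEC =====
def Spec_stringProblem (A : String) (B : String) (out : Int) : Prop := out = stringProblem_alt A B
instance (A : String) (B : String) (out : Int) : Decidable (Spec_stringProblem A B out) := by unfold Spec_stringProblem; infer_instance

-- ===== CLAIM (what is proved, stated in full; the proofs are below) =====
def Claim_equal_stringProblem : Prop := ∀ (A : String) (B : String), Dom_stringProblem A B → Spec_stringProblem A B (stringProblem A B)

-- ===== LEMMAS AND PROOFS =====

-- the common mathematical recurrence both ports compute
def edi (as bs : List Char) : Nat → Nat → Int
  | 0, j => (j : Int)
  | i + 1, 0 => (i : Int) + 1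
  | i + 1, j + 1 =>
    if as.getD i ' ' == bs.getD j ' ' then edi as bs i j
    else if vowelcheck (as.getD i ' ') && !vowelcheck (bs.getD j ' ') then
      1 + min (edi as bs (i + 1) j) (edi as bs i (j + 1))
    else
      1 + min (edi as bs (i + 1) j) (min (edi as bs i (j + 1)) (edi as bs i j))
  termination_by i j => (i, j)

def MemoOK (as bs : List Char) (m : PySem.Dict (Nat × Nat) Int) : Prop :=
  ∀ i j v, m.get? (i, j) = some v → v = edi as bs i j

theorem memoOK_insert {as bs : List Char} {m : PySem.Dict (Nat × Nat) Int} {i j : Nat} {r : Int}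
    (hm : MemoOK as bs m) (h : r = edi as bs i j) : MemoOK as bs (m.insert (i, j) r) := by
  intro i' j' v hv
  by_cases he : ((i', j') : Nat × Nat) = (i, j)
  · cases he
    rw [PySem.Dict.get?_insert_self] at hv
    cases hv
    exact h
  · rw [PySem.Dict.get?_insert_of_ne _ _ he] at hv
    exact hm _ _ _ hv

theorem edi_zero (as bs : List Char) (j : Nat) : edi as bs 0 j = (j : Int) := by
  rw [edi.eq_def]

theorem edi_succ_zero (as bs : List Char) (i : Nat) : edi as bs (i + 1) 0 = (i : Int) + 1 := by
  rw [edi.eq_def]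

theorem edi_succ_succ (as bs : List Char) (i j : Nat) :
    edi as bs (i + 1) (j + 1)
      = if as.getD i ' ' == bs.getD j ' ' then edi as bs i j
        else if vowelcheck (as.getD i ' ') && !vowelcheck (bs.getD j ' ') then
          1 + min (edi as bs (i + 1) j) (edi as bs i (j + 1))
        else
          1 + min (edi as bs (i + 1) j) (min (edi as bs i (j + 1)) (edi as bs i j)) := by
  rw [edi.eq_def]

theorem distB_correct (as bs : List Char) :
    ∀ n i j m, i + j ≤ n → MemoOK as bs m →
      (distB as bs i j m).1 = edi as bs i j ∧ MemoOK as bs (distB as bs i j m).2 := by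
  intro n
  induction n with
  | zero =>
    intro i j m hn hm
    obtain ⟨rfl, rfl⟩ : i = 0 ∧ j = 0 := by omega
    rw [distB.eq_def]
    cases hmo : m.get? (0, 0) with
    | some v => simp only [hmo]; exact ⟨hm _ _ _ hmo, hm⟩
    | none =>
      simp only [hmo]
      exact ⟨(edi_zero as bs 0).symm, memoOK_insert hm (edi_zero as bs 0).symm⟩
  | succ n IH =>
    intro i j m hn hm
    rw [distB.eq_def]
    cases hmo : m.get? (i, j) with
    | some v => simp only [hmo]; exact ⟨hm _ _ _ hmo, hm⟩
    | none =>
      simp only [hmo]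
      match i, j with
      | 0, j =>
        exact ⟨(edi_zero as bs j).symm, memoOK_insert hm (edi_zero as bs j).symm⟩
      | i + 1, 0 =>
        exact ⟨(edi_succ_zero as bs i).symm, memoOK_insert hm (edi_succ_zero as bs i).symm⟩
      | i + 1, j + 1 =>
        dsimp only
        by_cases hch : (as.getD i ' ' == bs.getD j ' ') = true
        · rw [if_pos hch]
          obtain ⟨h1, h2⟩ := IH i j m (by omega) hm
          have he : edi as bs (i + 1) (j + 1) = edi as bs i j := by
            rw [edi_succ_succ, if_pos hch]
          exact ⟨h1.trans he.symm, memoOK_insert h2 (h1.trans he.symm)⟩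
        · rw [if_neg hch]
          obtain ⟨e1, k1⟩ := IH (i + 1) j m (by omega) hm
          obtain ⟨e2, k2⟩ := IH i (j + 1) (distB as bs (i + 1) j m).2 (by omega) k1
          by_cases hv : (vowelcheck (as.getD i ' ') && !vowelcheck (bs.getD j ' ')) = true
          · rw [if_neg (by simp only [hv]; decide)]
            have he : edi as bs (i + 1) (j + 1)
                = 1 + min (edi as bs (i + 1) j) (edi as bs i (j + 1)) := by
              rw [edi_succ_succ, if_neg hch, if_pos hv]
            have hq : 1 + min (distB as bs (i + 1) j m).1
                (distB as bs i (j + 1) (distB as bs (i + 1) j m).2).1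
                = edi as bs (i + 1) (j + 1) := by rw [he, e1, e2]
            exact ⟨hq, memoOK_insert k2 hq⟩
          · rw [if_pos (by simp only [Bool.not_eq_true] at hv; simp only [hv]; decide)]
            obtain ⟨e3, k3⟩ :=
              IH i j (distB as bs i (j + 1) (distB as bs (i + 1) j m).2).2 (by omega) k2
            have he : edi as bs (i + 1) (j + 1)
                = 1 + min (edi as bs (i + 1) j) (min (edi as bs i (j + 1)) (edi as bs i j)) := by
              rw [edi_succ_succ, if_neg hch, if_neg hv]
            have hq : min (1 + min (distB as bs (i + 1) j m).1
                  (distB as bs i (j + 1) (distB as bs (i + 1) j m).2).1)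
                (1 + (distB as bs i j (distB as bs i (j + 1) (distB as bs (i + 1) j m).2).2).1)
                = edi as bs (i + 1) (j + 1) := by
              rw [e1, e2, e3, he]
              simp only [min_def]
              split_ifs <;> omega
            exact ⟨hq, memoOK_insert k3 hq⟩

-- A side: row invariant
theorem rowA_take (as bs : List Char) (i : Nat) (hi : i < as.length) :
    ∀ t, t ≤ bs.length →
      (PySem.List.enumerate (bs.take t) 0).foldl
          (rowStep ((List.range (bs.length + 1)).map (fun j => edi as bs i j)) (as.getD i ' '))
          [(i : Int) + 1]
        = (List.range (t + 1)).map (fun j => edi as bs (i + 1) j) := by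
  intro t
  induction t with
  | zero =>
    intro _
    simp [PySem.List.enumerate_nil, List.range_succ, edi_succ_zero]
  | succ t IHt =>
    intro ht
    have htl : t < bs.length := by omega
    rw [List.take_succ, List.getElem?_eq_getElem htl]
    simp only [Option.toList_some]
    rw [PySem.List.enumerate_append, List.foldl_append, IHt (by omega)]
    have hlen : ((bs.take t).length : Int) = (t : Int) := by
      simp [List.length_take, Nat.min_eq_left (le_of_lt htl)]
    rw [PySem.List.enumerate_cons, PySem.List.enumerate_nil]
    simp only [List.foldl_cons, List.foldl_nil, hlen]
    have hjj : bs[t] = bs.getD t ' ' := (List.getD_eq_getElem bs ' ' htl).symm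
    have hgc : ∀ k : Nat, k < bs.length + 1 →
        PySem.List.pyGetD ((List.range (bs.length + 1)).map (fun j => edi as bs i j)) (k : Int) 0
          = edi as bs i k := by
      intro k hk
      rw [PySem.List.pyGetD_natCast]
      simp [List.getD_eq_getElem?_getD, List.getElem?_map, List.getElem?_range hk]
    have hgd : PySem.List.pyGetD ((List.range (t + 1)).map (fun j => edi as bs (i + 1) j)) ((t : Nat) : Int) 0
        = edi as bs (i + 1) t := by
      rw [PySem.List.pyGetD_natCast]
      simp [List.getD_eq_getElem?_getD, List.getElem?_map, List.getElem?_range (Nat.lt_succ_self t)]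
    have hcast : ((t : Nat) : Int) + 1 = (((t + 1 : Nat)) : Int) := by push_cast; ring
    rw [List.range_succ (n := t + 1), List.map_append]
    unfold rowStep
    simp only [zero_add, hcast, hgd]
    rw [hgc t (by omega), hgc (t + 1) (by omega)]
    rw [hjj]
    simp only [List.map_cons, List.map_nil]
    rw [edi_succ_succ]
    by_cases hch : (as.getD i ' ' == bs.getD t ' ') = true
    · rw [if_pos hch, if_pos hch]
    · rw [if_neg hch, if_neg hch]
      by_cases hvi : vowelcheck (as.getD i ' ') = true
      · by_cases hvj : vowelcheck (bs.getD t ' ') = true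
        · rw [if_pos hvi, if_pos hvj, if_neg (by rw [hvi, hvj]; decide)]
        · simp only [Bool.not_eq_true] at hvj
          rw [if_pos hvi, if_neg (by rw [hvj]; decide), if_pos (by rw [hvi, hvj]; decide)]
      · simp only [Bool.not_eq_true] at hvi
        rw [if_neg (by rw [hvi]; decide), if_neg (by rw [hvi, Bool.false_and]; decide)]

theorem rowA_spec (as bs : List Char) (i : Nat) (hi : i < as.length) :
    rowA ((List.range (bs.length + 1)).map (fun j => edi as bs i j)) (i : Int) (as.getD i ' ') bs
      = (List.range (bs.length + 1)).map (fun j => edi as bs (i + 1) j) := by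
  have h := rowA_take as bs i hi bs.length le_rfl
  rw [List.take_length] at h
  unfold rowA
  exact h

theorem outerA (as bs : List Char) :
    ∀ t, t ≤ as.length →
      (PySem.List.enumerate (as.take t) 0).foldl (fun c p => rowA c p.1 p.2 bs)
          ((List.range (bs.length + 1)).map (fun j => edi as bs 0 j))
        = (List.range (bs.length + 1)).map (fun j => edi as bs t j) := by
  intro t
  induction t with
  | zero => intro _; simp [PySem.List.enumerate_nil]
  | succ t IHt =>
    intro ht
    have htl : t < as.length := by omega
    rw [List.take_succ, List.getElem?_eq_getElem htl]
    simp only [Option.toList_some]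
    rw [PySem.List.enumerate_append, List.foldl_append, IHt (by omega)]
    have hlen : ((as.take t).length : Int) = (t : Int) := by
      simp [List.length_take, Nat.min_eq_left (le_of_lt htl)]
    rw [PySem.List.enumerate_cons, PySem.List.enumerate_nil]
    simp only [List.foldl_cons, List.foldl_nil, hlen, zero_add]
    have hii : as[t] = as.getD t ' ' := (List.getD_eq_getElem as ' ' htl).symm
    rw [hii]
    exact rowA_spec as bs t htl

theorem stringProblem_eq_edi (A B : String) :
    stringProblem A B = edi A.toList B.toList A.toList.length B.toList.length := by
  unfold stringProblem
  dsimp only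
  have hc0 : (PySem.List.pyRange 0 ((B.toList.length : Int) + 1) 1).foldl
      (fun c i => c ++ [i]) ([] : List Int)
      = (List.range (B.toList.length + 1)).map (fun j => edi A.toList B.toList 0 j) := by
    rw [PySem.List.foldl_append_singleton_eq_self, PySem.List.pyRange_one]
    simp only [List.nil_append, sub_zero]
    have : ((B.toList.length : Int) + 1).toNat = B.toList.length + 1 := by omega
    rw [this]
    exact List.map_congr_left (fun k _ => by rw [edi_zero]; ring)
  rw [hc0]
  have h := outerA A.toList B.toList A.toList.length le_rfl
  rw [List.take_length] at h
  rw [h, List.range_succ, List.map_append]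
  simp [PySem.List.pyGetD_neg_one_append_singleton]

theorem stringProblem_alt_eq_edi (A B : String) :
    stringProblem_alt A B = edi A.toList B.toList A.toList.length B.toList.length := by
  unfold stringProblem_alt
  exact (distB_correct A.toList B.toList (A.toList.length + B.toList.length)
    A.toList.length B.toList.length PySem.Dict.empty le_rfl
    (fun i j v h => by simp [PySem.Dict.get?_empty] at h)).1

-- ===== VERDICT (by name: the statement is the Claim_ definition above) =====
theorem stringProblem_spec : Claim_equal_stringProblem := by
  intro A B _
  unfold Spec_stringProblem
  rw [stringProblem_eq_edi, stringProblem_alt_eq_edi]
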